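-- pv_equiv track=rewrite | github.com/shanayamalik/cs294-sp26 | backend/app/parser.py | _extract_multiline_block
-- ===== SOURCE A (Python) =====
-- def _first_matching_line(lines: list[str], value: str) -> int | None:
--     expected = value.upper()
--     for index, line in enumerate(lines):
--         if line.strip().upper() == expected:
--             return index
--     return None
--
-- def _extract_multiline_block(lines: list[str], start_label: str, end_labels: set[str]) -> list[str] | None:
--     start_index = _first_matching_line(lines, start_label)
--     if start_index is None:
--         return None
--
--     values: list[str] = []
--     for line in lines[start_index + 1 :]:
--         normalized = line.upper()
--         if normalized in end_labels:
--             break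
--         if line:
--             values.append(line)
--
--     return values or None
-- ===== SOURCE B (Python) =====
-- def _extract_multiline_block(lines, start_label, end_labels):
--     expected = start_label.upper()
--     started = False
--     values = []
--     for line in lines:
--         if not started:
--             if line.strip().upper() == expected:
--                 started = True
--             continue
--         if line.upper() in end_labels:
--             break
--         if line:
--             values.append(line)
--     if not started:
--         return None
--     return values or None
-- ===== Notes on version B (the rewrite author's own statement) =====
-- stated objective: simpler
-- what changed: Replaces A's two-phase decomposition (a helper scanning for the start index, then a second loop over a slice) with one single-pass state machine over the lines using a 'started' flag; no index bookkeeping and no slicing.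
import Mathlib
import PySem

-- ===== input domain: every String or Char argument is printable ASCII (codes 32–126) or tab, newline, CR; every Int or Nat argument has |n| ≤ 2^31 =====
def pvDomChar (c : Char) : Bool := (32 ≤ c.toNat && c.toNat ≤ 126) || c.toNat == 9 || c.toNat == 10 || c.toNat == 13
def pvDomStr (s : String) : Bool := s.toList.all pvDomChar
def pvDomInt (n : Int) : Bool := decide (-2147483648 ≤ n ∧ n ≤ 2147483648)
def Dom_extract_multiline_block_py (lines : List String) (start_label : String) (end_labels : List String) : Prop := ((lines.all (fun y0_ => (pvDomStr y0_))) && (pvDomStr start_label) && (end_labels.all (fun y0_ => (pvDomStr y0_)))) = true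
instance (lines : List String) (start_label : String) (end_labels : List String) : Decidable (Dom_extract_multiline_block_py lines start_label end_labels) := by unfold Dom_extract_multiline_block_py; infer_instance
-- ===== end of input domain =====

-- B replaces A's two-phase decomposition (find start index, then loop over a slice) with one single-pass state machine using a `started` flag (objective: simpler).


-- ===== PORT A =====
-- helper: Python _first_matching_line (enumerate loop, first index whose strip().upper() equals expected)
def pvFirstAux (expected : String) : List String → Nat → Option Nat
  | [], _ => none
  | l :: ls, i =>
    if PySem.Str.upper (PySem.Str.strip l) = expected then some i
    else pvFirstAux expected ls (i + 1)

def first_matching_line_py (lines : List String) (value : String) : Option Nat :=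
  pvFirstAux (PySem.Str.upper value) lines 0

-- A's second loop over lines[start_index+1:]: break on end label (no strip), append non-empty lines
def pvCollectA (end_labels : List String) : List String → List String
  | [] => []
  | l :: ls =>
    if end_labels.contains (PySem.Str.upper l) then []
    else if l ≠ "" then l :: pvCollectA end_labels ls
    else pvCollectA end_labels ls

def extract_multiline_block_py (lines : List String) (start_label : String) (end_labels : List String) : Option (List String) :=
  match first_matching_line_py lines start_label with
  | none => none
  | some start_index =>
    let values := pvCollectA end_labels (lines.drop (start_index + 1))
    if values = [] then none else some values

-- ===== PORT B =====
-- B: single-pass state machine with a `started` flag and an accumulator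
def pvLoopB (expected : String) (end_labels : List String) : List String → Bool → List String → Bool × List String
  | [], started, values => (started, values)
  | l :: ls, started, values =>
    if !started then
      if PySem.Str.upper (PySem.Str.strip l) = expected then pvLoopB expected end_labels ls true values
      else pvLoopB expected end_labels ls false values
    else if end_labels.contains (PySem.Str.upper l) then (started, values)
    else if l ≠ "" then pvLoopB expected end_labels ls started (values ++ [l])
    else pvLoopB expected end_labels ls started values

def extract_multiline_block_py_alt (lines : List String) (start_label : String) (end_labels : List String) : Option (List String) :=
  let r := pvLoopB (PySem.Str.upper start_label) end_labels lines false []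
  if !r.1 then none
  else if r.2 = [] then none else some r.2

-- ===== PRECONDITION & SPEC =====
def Spec_extract_multiline_block_py (lines : List String) (start_label : String) (end_labels : List String) (out : Option (List String)) : Prop := out = extract_multiline_block_py_alt lines start_label end_labels
instance (lines : List String) (start_label : String) (end_labels : List String) (out : Option (List String)) : Decidable (Spec_extract_multiline_block_py lines start_label end_labels out) := by unfold Spec_extract_multiline_block_py; infer_instance

-- ===== CLAIM (what is proved, stated in full; the proofs are below) =====
def Claim_equal_extract_multiline_block_py : Prop := ∀ (lines : List String) (start_label : String) (end_labels : List String), Dom_extract_multiline_block_py lines start_label end_labels → Spec_extract_multiline_block_py lines start_label end_labels (extract_multiline_block_py lines start_label end_labels)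

-- ===== LEMMAS AND PROOFS =====
theorem pvLoopB_true (expected : String) (E : List String) :
    ∀ (ls : List String) (vs : List String),
      pvLoopB expected E ls true vs = (true, vs ++ pvCollectA E ls) := by
  intro ls
  induction ls with
  | nil => intro vs; simp [pvLoopB, pvCollectA]
  | cons l ls ih =>
    intro vs
    simp only [pvLoopB, pvCollectA, Bool.not_true]
    split_ifs with h0 h1 h2 <;> simp_all [ih]

theorem pvFirstAux_shift (expected : String) :
    ∀ (ls : List String) (n : Nat),
      pvFirstAux expected ls (n + 1) = (pvFirstAux expected ls n).map (· + 1) := by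
  intro ls
  induction ls with
  | nil => intro n; simp [pvFirstAux]
  | cons l ls ih =>
    intro n
    by_cases h : PySem.Str.upper (PySem.Str.strip l) = expected
    · simp [pvFirstAux, h]
    · simp [pvFirstAux, h, ih]

theorem pvLoopB_false (expected : String) (E : List String) :
    ∀ (ls : List String) (vs : List String),
      pvLoopB expected E ls false vs =
        match pvFirstAux expected ls 0 with
        | none => (false, vs)
        | some i => (true, vs ++ pvCollectA E (ls.drop (i + 1))) := by
  intro ls
  induction ls with
  | nil => intro vs; simp [pvLoopB, pvFirstAux]
  | cons l ls ih =>
    intro vs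
    by_cases h : PySem.Str.upper (PySem.Str.strip l) = expected
    · simp [pvLoopB, pvFirstAux, h, pvLoopB_true]
    · simp only [pvLoopB, pvFirstAux, h, if_false, Bool.not_false, if_true, ih, pvFirstAux_shift]
      cases hfa : pvFirstAux expected ls 0 with
      | none => simp
      | some i => simp [List.drop]

theorem extract_multiline_block_py_eq :
    ∀ (lines : List String) (start_label : String) (end_labels : List String),
      extract_multiline_block_py lines start_label end_labels
        = extract_multiline_block_py_alt lines start_label end_labels := by
  intro lines start_label end_labels
  unfold extract_multiline_block_py extract_multiline_block_py_alt first_matching_line_py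
  rw [pvLoopB_false]
  cases hfa : pvFirstAux (PySem.Str.upper start_label) lines 0 with
  | none => simp
  | some i => simp

-- ===== VERDICT (by name: the statement is the Claim_ definition above) =====
theorem extract_multiline_block_py_spec : Claim_equal_extract_multiline_block_py := by
  intro lines start_label end_labels _
  exact extract_multiline_block_py_eq lines start_label end_labels
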